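-- pv_equiv track=rewrite | github.com/SJFWey/aoi-anomaly-inspector | scripts/check_data.py | _pick_defect_type
-- ===== SOURCE A (Python) =====
-- def _pick_defect_type(defect_types: list[str]) -> str | None:
--     non_good = [d for d in defect_types if d != "good"]
--     if non_good:
--         # Prefer common "obvious defect" folders if they exist.
--         for preferred in ("broken_large", "crack", "damaged_case", "misplaced"):
--             if preferred in non_good:
--                 return preferred
--         return non_good[0]
--     return defect_types[0] if defect_types else None
-- ===== SOURCE B (Python) =====
-- def _pick_defect_type(defect_types: list[str]) -> str | None:
--     priority = {"broken_large": 0, "crack": 1, "damaged_case": 2, "misplaced": 3}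
--     non_good = [d for d in defect_types if d != "good"]
--     if non_good:
--         return min(non_good, key=lambda d: priority.get(d, 4))
--     return defect_types[0] if defect_types else None
-- ===== Notes on version B (the rewrite author's own statement) =====
-- stated objective: idiomatic
-- what changed: Instead of scanning the preferred tuple and probing membership in the data for each label, B makes one min() pass over the data with a priority-dict key (unknown labels rank last, ties resolved to the first occurrence), which reproduces A's choice exactly.
import Mathlib
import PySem

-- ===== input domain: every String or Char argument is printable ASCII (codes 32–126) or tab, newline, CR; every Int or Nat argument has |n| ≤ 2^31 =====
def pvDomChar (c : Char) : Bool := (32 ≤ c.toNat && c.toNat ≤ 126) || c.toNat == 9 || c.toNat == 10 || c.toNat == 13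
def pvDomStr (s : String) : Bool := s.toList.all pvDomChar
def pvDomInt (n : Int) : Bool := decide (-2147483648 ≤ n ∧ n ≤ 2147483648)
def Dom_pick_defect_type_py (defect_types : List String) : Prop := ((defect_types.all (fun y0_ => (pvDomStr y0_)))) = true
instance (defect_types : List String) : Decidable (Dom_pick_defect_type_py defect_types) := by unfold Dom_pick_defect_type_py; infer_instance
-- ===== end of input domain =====

-- B replaces A's scan over the preferred tuple (membership probe per label) by one
-- min() pass over the data keyed by a priority dict; same value on every input (idiomatic, not faster).

-- ===== PORT A =====
def pick_defect_type_py (defect_types : List String) : Option String :=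
  let nonGood := defect_types.filter (· != "good")
  if nonGood ≠ [] then
    -- the for-loop over the preferred tuple: first preferred label contained in nonGood
    match ["broken_large", "crack", "damaged_case", "misplaced"].find?
        (fun p => nonGood.contains p) with
    | some p => some p
    | none => nonGood.head?          -- non_good[0]; nonGood ≠ [] here
  else
    defect_types.head?               -- defect_types[0] if defect_types else None

-- ===== PORT B =====
def pick_defect_type_py_alt (defect_types : List String) : Option String :=
  let priority : PySem.Dict String Int :=
    ⟨[("broken_large", 0), ("crack", 1), ("damaged_case", 2), ("misplaced", 3)]⟩
  let nonGood := defect_types.filter (· != "good")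
  if nonGood ≠ [] then
    PySem.List.min? nonGood (fun d => PySem.Dict.getD priority d 4)
  else
    defect_types.head?

-- ===== PRECONDITION & SPEC =====
def Spec_pick_defect_type_py (defect_types : List String) (out : Option String) : Prop := out = pick_defect_type_py_alt defect_types
instance (defect_types : List String) (out : Option String) : Decidable (Spec_pick_defect_type_py defect_types out) := by unfold Spec_pick_defect_type_py; infer_instance

-- ===== CLAIM (what is proved, stated in full; the proofs are below) =====
def Claim_equal_pick_defect_type_py : Prop := ∀ (defect_types : List String), Dom_pick_defect_type_py defect_types → Spec_pick_defect_type_py defect_types (pick_defect_type_py defect_types)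

-- ===== LEMMAS AND PROOFS =====

-- B's key function, spelled out as an if-chain
def pvPrio (s : String) : Int :=
  PySem.Dict.getD (⟨[("broken_large", 0), ("crack", 1), ("damaged_case", 2), ("misplaced", 3)]⟩ : PySem.Dict String Int) s 4

theorem pvPrio_eq (s : String) :
    pvPrio s = if s = "broken_large" then 0 else if s = "crack" then 1
      else if s = "damaged_case" then 2 else if s = "misplaced" then 3 else 4 := by
  simp only [pvPrio, PySem.Dict.getD, PySem.Dict.get?, List.find?]
  rcases eq_or_ne s "broken_large" with e0 | e0
  · subst e0; decide
  simp only [if_neg e0, show ("broken_large" == s) = false from beq_eq_false_iff_ne.mpr (Ne.symm e0)]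
  rcases eq_or_ne s "crack" with e1 | e1
  · subst e1; decide
  simp only [if_neg e1, show ("crack" == s) = false from beq_eq_false_iff_ne.mpr (Ne.symm e1)]
  rcases eq_or_ne s "damaged_case" with e2 | e2
  · subst e2; decide
  simp only [if_neg e2, show ("damaged_case" == s) = false from beq_eq_false_iff_ne.mpr (Ne.symm e2)]
  rcases eq_or_ne s "misplaced" with e3 | e3
  · subst e3; decide
  simp only [if_neg e3, show ("misplaced" == s) = false from beq_eq_false_iff_ne.mpr (Ne.symm e3)]
  rfl

theorem pvPrio_nonneg (s : String) : 0 ≤ pvPrio s := by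
  rw [pvPrio_eq]; split_ifs <;> norm_num

-- the running-min fold keeps its accumulator when nothing beats it
theorem foldl_min_keep {α : Type} (key : α → Int) (t : List α) (m : α)
    (h : ∀ y ∈ t, ¬ key y < key m) :
    List.foldl (fun acc x => match acc with
      | none => some x
      | some m => if key x < key m then some x else some m) (some m) t = some m := by
  induction t with
  | nil => rfl
  | cons y t ih =>
    simp only [List.foldl, if_neg (h y (by simp))]
    exact ih (fun z hz => h z (by simp [hz]))

-- if every element has the same key value, the running-min loop keeps the head
theorem min?_all_eq {α : Type} (xs : List α) (key : α → Int) (c : Int)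
    (h : ∀ y ∈ xs, key y = c) : PySem.List.min? xs key = xs.head? := by
  cases xs with
  | nil => rfl
  | cons x t =>
    show List.foldl _ (some x) t = some x
    exact foldl_min_keep key t x (fun y hy => by
      have := h y (by simp [hy]); have := h x (by simp); omega)

theorem pick_eq (defect_types : List String) :
    pick_defect_type_py defect_types = pick_defect_type_py_alt defect_types := by
  unfold pick_defect_type_py pick_defect_type_py_alt
  set ng := defect_types.filter (· != "good") with hng
  by_cases hne : ng = []
  · simp [hne]
  · simp only [if_pos hne]
    -- B's side produces some μ, a minimiser of pvPrio over ng
    obtain ⟨μ, hμ⟩ : ∃ μ, PySem.List.min? ng pvPrio = some μ := by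
      cases h : PySem.List.min? ng pvPrio with
      | none => exact absurd ((PySem.List.min?_eq_none_iff ng pvPrio).mp h) hne
      | some m => exact ⟨m, rfl⟩
    have hmem := PySem.List.min?_mem hμ
    have hmin := PySem.List.min?_isMin hμ
    have hB : PySem.List.min? ng (fun d => PySem.Dict.getD (⟨[("broken_large", 0), ("crack", 1), ("damaged_case", 2), ("misplaced", 3)]⟩ : PySem.Dict String Int) d 4) = some μ := hμ
    rw [hB]
    by_cases h0 : "broken_large" ∈ ng
    · have hle := hmin _ h0
      have : pvPrio μ = 0 := by
        have := pvPrio_nonneg μ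
        rw [pvPrio_eq "broken_large"] at hle; simp at hle; omega
      have hμeq : μ = "broken_large" := by
        rw [pvPrio_eq] at this; split_ifs at this <;> simp_all
      simp [List.find?, h0, hμeq]
    by_cases h1 : "crack" ∈ ng
    · have hle := hmin _ h1
      have hp : pvPrio μ = 1 := by
        have hnn := pvPrio_nonneg μ
        have hne0 : pvPrio μ ≠ 0 := by
          intro hz
          apply h0
          have : μ = "broken_large" := by rw [pvPrio_eq] at hz; split_ifs at hz <;> simp_all
          rwa [this] at hmem
        rw [pvPrio_eq "crack"] at hle; simp at hle; omega
      have hμeq : μ = "crack" := by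
        rw [pvPrio_eq] at hp; split_ifs at hp <;> simp_all
      simp [List.find?, h0, h1, hμeq]
    by_cases h2 : "damaged_case" ∈ ng
    · have hle := hmin _ h2
      have hp : pvPrio μ = 2 := by
        have hnn := pvPrio_nonneg μ
        have hne0 : pvPrio μ ≠ 0 := by
          intro hz
          apply h0
          have : μ = "broken_large" := by rw [pvPrio_eq] at hz; split_ifs at hz <;> simp_all
          rwa [this] at hmem
        have hne1 : pvPrio μ ≠ 1 := by
          intro hz
          apply h1
          have : μ = "crack" := by rw [pvPrio_eq] at hz; split_ifs at hz <;> simp_all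
          rwa [this] at hmem
        rw [pvPrio_eq "damaged_case"] at hle; simp at hle; omega
      have hμeq : μ = "damaged_case" := by
        rw [pvPrio_eq] at hp; split_ifs at hp <;> simp_all
      simp [List.find?, h0, h1, h2, hμeq]
    by_cases h3 : "misplaced" ∈ ng
    · have hle := hmin _ h3
      have hp : pvPrio μ = 3 := by
        have hnn := pvPrio_nonneg μ
        have hne0 : pvPrio μ ≠ 0 := by
          intro hz
          apply h0
          have : μ = "broken_large" := by rw [pvPrio_eq] at hz; split_ifs at hz <;> simp_all
          rwa [this] at hmem
        have hne1 : pvPrio μ ≠ 1 := by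
          intro hz
          apply h1
          have : μ = "crack" := by rw [pvPrio_eq] at hz; split_ifs at hz <;> simp_all
          rwa [this] at hmem
        have hne2 : pvPrio μ ≠ 2 := by
          intro hz
          apply h2
          have : μ = "damaged_case" := by rw [pvPrio_eq] at hz; split_ifs at hz <;> simp_all
          rwa [this] at hmem
        rw [pvPrio_eq "misplaced"] at hle; simp at hle; omega
      have hμeq : μ = "misplaced" := by
        rw [pvPrio_eq] at hp; split_ifs at hp <;> simp_all
      simp [List.find?, h0, h1, h2, h3, hμeq]
    · -- no preferred label present: every key is 4, min is the first element
      have hall : ∀ y ∈ ng, pvPrio y = 4 := by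
        intro y hy
        rw [pvPrio_eq]
        split_ifs with e0 e1 e2 e3 <;> first
          | rfl
          | (exfalso; subst_vars; first | exact h0 hy | exact h1 hy | exact h2 hy | exact h3 hy)
      have := min?_all_eq ng pvPrio 4 hall
      rw [this] at hμ
      simp [List.find?, h0, h1, h2, h3, hμ]

-- ===== VERDICT (by name: the statement is the Claim_ definition above) =====
theorem pick_defect_type_py_spec : Claim_equal_pick_defect_type_py := by
  intro defect_types _
  unfold Spec_pick_defect_type_py
  exact pick_eq defect_types
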